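-- pv_equiv track=rewrite | github.com/wurthless-elektroniks/unpack64 | compression/rnc.py | _mirror_bits
-- ===== SOURCE A (Python) =====
-- def _mirror_bits(value: int, bits: int):
--     top = 1 << (bits-1)
--     bot = 1
--     while top > bot:
--         mask = top | bot
--         masked = value & mask
--         if masked != 0 and masked != mask:
--             value ^= mask
--         top >>= 1
--         bot <<= 1
--     return value
-- ===== SOURCE B (Python) =====
-- def _mirror_bits(value: int, bits: int):
--     low = 0
--     for i in range(bits):
--         low = (low << 1) | ((value >> i) & 1)
--     return ((value >> bits) << bits) | low
-- ===== Notes on version B (the rewrite author's own statement) =====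
-- stated objective: simpler
-- what changed: A reverses the low bits in place by conditionally xor-swapping symmetric bit pairs under a shrinking top/bot mask pair; B rebuilds the reversed low field in one accumulating pass (low = (low<<1) | ((value>>i)&1)) and recombines it with the untouched high part via ((value>>bits)<<bits) | low.
import Mathlib
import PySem

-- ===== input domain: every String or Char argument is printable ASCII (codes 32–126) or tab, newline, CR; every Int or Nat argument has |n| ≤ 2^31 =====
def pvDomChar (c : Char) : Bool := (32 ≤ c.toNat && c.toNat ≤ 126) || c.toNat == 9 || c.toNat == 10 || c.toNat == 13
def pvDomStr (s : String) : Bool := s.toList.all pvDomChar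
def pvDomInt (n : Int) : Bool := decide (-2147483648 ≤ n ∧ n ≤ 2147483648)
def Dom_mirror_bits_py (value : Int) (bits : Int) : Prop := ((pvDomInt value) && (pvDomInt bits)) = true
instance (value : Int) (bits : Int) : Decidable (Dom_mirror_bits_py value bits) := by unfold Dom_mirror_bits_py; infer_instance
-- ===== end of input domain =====

-- B replaces A's in-place xor pair-swapping with a single accumulating rebuild of the
-- reversed low field, recombined with the untouched high part (objective: simpler).

-- ===== PORT A =====
-- while top > bot: … ; fuel = bits.toNat bounds the iteration count (the guard itself
-- stops the loop; the fuel only makes the recursion structural and is never the reason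
-- the loop stops on admitted inputs — proved in the lemmas below).
def mirrorLoopA : Nat → Int → Int → Int → Int
  | 0, value, _, _ => value
  | fuel+1, value, top, bot =>
    if top > bot then
      let mask := PySem.Int.bor top bot
      let masked := PySem.Int.band value mask
      let value' := if masked ≠ 0 ∧ masked ≠ mask then PySem.Int.bxor value mask else value
      mirrorLoopA fuel value' (top >>> (1:Nat)) (bot <<< (1:Nat))
    else value

-- top = 1 << (bits-1); with Pre_ (1 ≤ bits) the shift amount (bits-1).toNat is exact
def mirror_bits_py (value : Int) (bits : Int) : Int :=
  mirrorLoopA bits.toNat value ((1:Int) <<< (bits - 1).toNat) 1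

-- ===== PORT B =====
def mirror_bits_py_alt (value : Int) (bits : Int) : Int :=
  let low := (PySem.List.pyRange 0 bits).foldl
    (fun low i => PySem.Int.bor (low <<< (1:Nat)) (PySem.Int.band (value >>> i.toNat) 1)) 0
  PySem.Int.bor ((value >>> bits.toNat) <<< bits.toNat) low

-- ===== PRECONDITION & SPEC =====
-- A raises ValueError (negative shift count) for bits ≤ 0; exactly those inputs are excluded.
def Pre_mirror_bits_py (value : Int) (bits : Int) : Prop := 1 ≤ bits
instance (value : Int) (bits : Int) : Decidable (Pre_mirror_bits_py value bits) := by unfold Pre_mirror_bits_py; infer_instance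
def pvWitness_mirror_bits_py : Int × Int := (13, 5)

def Spec_mirror_bits_py (value : Int) (bits : Int) (out : Int) : Prop := out = mirror_bits_py_alt value bits
instance (value : Int) (bits : Int) (out : Int) : Decidable (Spec_mirror_bits_py value bits out) := by unfold Spec_mirror_bits_py; infer_instance

-- ===== CLAIM (what is proved, stated in full; the proofs are below) =====
def Claim_equal_mirror_bits_py : Prop := ∀ (value : Int) (bits : Int), Dom_mirror_bits_py value bits → Pre_mirror_bits_py value bits → Spec_mirror_bits_py value bits (mirror_bits_py value bits)

-- ===== LEMMAS AND PROOFS =====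

theorem tb_natCast (m k : Nat) : ((m : Int)).testBit k = m.testBit k := rfl

theorem tb_negSucc (m k : Nat) : (Int.negSucc m).testBit k = !(m.testBit k) := rfl

theorem tb_zero (k : Nat) : (0 : Int).testBit k = false := by
  have : (0 : Int) = ((0 : Nat) : Int) := rfl
  rw [this, tb_natCast, Nat.zero_testBit]

theorem int_ext {a b : Int} (h : ∀ i, a.testBit i = b.testBit i) : a = b := by
  cases a with
  | ofNat m =>
    cases b with
    | ofNat n =>
      have : m = n := Nat.eq_of_testBit_eq (fun i => h i)
      simp [this]
    | negSucc n =>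
      exfalso
      have hk := h (m + n)
      have hm : m.testBit (m + n) = false :=
        Nat.testBit_lt_two_pow (lt_of_lt_of_le Nat.lt_two_pow_self
          (Nat.pow_le_pow_right (by norm_num) (Nat.le_add_right m n)))
      have hn : n.testBit (m + n) = false :=
        Nat.testBit_lt_two_pow (lt_of_lt_of_le Nat.lt_two_pow_self
          (Nat.pow_le_pow_right (by norm_num) (Nat.le_add_left n m)))
      rw [show (Int.ofNat m) = ((m : Nat) : Int) from rfl, tb_natCast, tb_negSucc, hm, hn] at hk
      simp at hk
  | negSucc m =>
    cases b with
    | ofNat n =>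
      exfalso
      have hk := h (m + n)
      have hm : m.testBit (m + n) = false :=
        Nat.testBit_lt_two_pow (lt_of_lt_of_le Nat.lt_two_pow_self
          (Nat.pow_le_pow_right (by norm_num) (Nat.le_add_right m n)))
      have hn : n.testBit (m + n) = false :=
        Nat.testBit_lt_two_pow (lt_of_lt_of_le Nat.lt_two_pow_self
          (Nat.pow_le_pow_right (by norm_num) (Nat.le_add_left n m)))
      rw [show (Int.ofNat n) = ((n : Nat) : Int) from rfl, tb_natCast, tb_negSucc, hm, hn] at hk
      simp at hk
    | negSucc n =>
      have : m = n := Nat.eq_of_testBit_eq (fun i => by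
        have := h i; rw [tb_negSucc, tb_negSucc] at this; simpa using this)
      simp [this]

-- Python-exact bitwise ops agree with Mathlib's Int.land/lor/xor
theorem ldiff_add_and (m n : Nat) : Nat.ldiff m n + (m &&& n) = m := by
  induction m using Nat.binaryRec generalizing n with
  | zero =>
    have h1 : Nat.ldiff 0 n = 0 := Nat.eq_of_testBit_eq (fun i => by
      simp [Nat.testBit_ldiff])
    simp [h1]
  | bit b m ih =>
    have hI := ih (n >>> 1)
    rw [← Nat.bit_testBit_zero_shiftRight_one n, Nat.ldiff_bit, Nat.land_bit,
       Nat.bit_val, Nat.bit_val, Nat.bit_val]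
    cases b <;> cases hn : n.testBit 0 <;> simp <;> omega

theorem sub_and (m n : Nat) : m - (m &&& n) = Nat.ldiff m n := by
  have := ldiff_add_and m n
  omega

theorem ofNat_nn (m : Nat) : (0:Int) ≤ Int.ofNat m := Int.natCast_nonneg m

theorem negSucc_nn (m : Nat) : ¬ (0:Int) ≤ Int.negSucc m := not_le.mpr (Int.negSucc_lt_zero m)

theorem negSucc_toNat (m : Nat) : (-Int.negSucc m - 1).toNat = m := by
  rw [Int.negSucc_eq]; omega

theorem ofNat_toNat (m : Nat) : (Int.ofNat m).toNat = m := rfl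

theorem band_eq (a b : Int) : PySem.Int.band a b = Int.land a b := by
  cases a with
  | ofNat m =>
    cases b with
    | ofNat n =>
      simp only [PySem.Int.band]
      rw [if_pos (ofNat_nn m), if_pos (ofNat_nn n), ofNat_toNat, ofNat_toNat]
      rfl
    | negSucc n =>
      simp only [PySem.Int.band]
      rw [if_pos (ofNat_nn m), if_neg (negSucc_nn n), negSucc_toNat, ofNat_toNat, sub_and]
      rfl
  | negSucc m =>
    cases b with
    | ofNat n =>
      simp only [PySem.Int.band]
      rw [if_neg (negSucc_nn m), if_pos (ofNat_nn n), negSucc_toNat, ofNat_toNat, sub_and]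
      rfl
    | negSucc n =>
      simp only [PySem.Int.band]
      rw [if_neg (negSucc_nn m), if_neg (negSucc_nn n), negSucc_toNat, negSucc_toNat,
         show Int.land (Int.negSucc m) (Int.negSucc n) = Int.negSucc (m ||| n) from rfl,
         Int.negSucc_eq]
      ring

theorem bor_eq (a b : Int) : PySem.Int.bor a b = Int.lor a b := by
  cases a with
  | ofNat m =>
    cases b with
    | ofNat n =>
      simp only [PySem.Int.bor]
      rw [if_pos (ofNat_nn m), if_pos (ofNat_nn n), ofNat_toNat, ofNat_toNat]
      rfl
    | negSucc n =>
      simp only [PySem.Int.bor]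
      rw [if_pos (ofNat_nn m), if_neg (negSucc_nn n), negSucc_toNat, ofNat_toNat, sub_and,
         show Int.lor (Int.ofNat m) (Int.negSucc n) = Int.negSucc (Nat.ldiff n m) from rfl,
         Int.negSucc_eq]
      ring
  | negSucc m =>
    cases b with
    | ofNat n =>
      simp only [PySem.Int.bor]
      rw [if_neg (negSucc_nn m), if_pos (ofNat_nn n), negSucc_toNat, ofNat_toNat, sub_and,
         show Int.lor (Int.negSucc m) (Int.ofNat n) = Int.negSucc (Nat.ldiff m n) from rfl,
         Int.negSucc_eq]
      ring
    | negSucc n =>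
      simp only [PySem.Int.bor]
      rw [if_neg (negSucc_nn m), if_neg (negSucc_nn n), negSucc_toNat, negSucc_toNat,
         show Int.lor (Int.negSucc m) (Int.negSucc n) = Int.negSucc (m &&& n) from rfl,
         Int.negSucc_eq]
      ring

theorem bxor_eq (a b : Int) : PySem.Int.bxor a b = Int.xor a b := by
  cases a with
  | ofNat m =>
    cases b with
    | ofNat n =>
      simp only [PySem.Int.bxor]
      rw [if_pos (ofNat_nn m), if_pos (ofNat_nn n), ofNat_toNat, ofNat_toNat]
      rfl
    | negSucc n =>
      simp only [PySem.Int.bxor]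
      rw [if_pos (ofNat_nn m), if_neg (negSucc_nn n), negSucc_toNat, ofNat_toNat,
         show Int.xor (Int.ofNat m) (Int.negSucc n) = Int.negSucc (m ^^^ n) from rfl,
         Int.negSucc_eq]
      ring
  | negSucc m =>
    cases b with
    | ofNat n =>
      simp only [PySem.Int.bxor]
      rw [if_neg (negSucc_nn m), if_pos (ofNat_nn n), negSucc_toNat, ofNat_toNat,
         show Int.xor (Int.negSucc m) (Int.ofNat n) = Int.negSucc (m ^^^ n) from rfl,
         Int.negSucc_eq]
      ring
    | negSucc n =>
      simp only [PySem.Int.bxor]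
      rw [if_neg (negSucc_nn m), if_neg (negSucc_nn n), negSucc_toNat, negSucc_toNat]
      rfl

-- shifts
theorem sr_tb (a : Int) (k i : Nat) : (a >>> k).testBit i = a.testBit (i + k) := by
  cases a with
  | ofNat m =>
    show (Int.ofNat (m >>> k)).testBit i = (Int.ofNat m).testBit (i + k)
    rw [show (Int.ofNat (m >>> k)) = ((m >>> k : Nat) : Int) from rfl,
       show (Int.ofNat m) = ((m : Nat) : Int) from rfl, tb_natCast, tb_natCast,
       Nat.testBit_shiftRight, Nat.add_comm]
  | negSucc m =>
    show (Int.negSucc (m >>> k)).testBit i = (Int.negSucc m).testBit (i + k)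
    rw [tb_negSucc, tb_negSucc, Nat.testBit_shiftRight, Nat.add_comm]

theorem sl_zero (a : Int) : a <<< (0:Nat) = a := by
  cases a with
  | ofNat m => show Int.ofNat (m <<< 0) = Int.ofNat m; simp
  | negSucc m => show Int.negSucc ((m+1) <<< 0 - 1) = Int.negSucc m; simp

theorem sl_succ (a : Int) (k : Nat) : a <<< (k+1) = 2 * (a <<< k) := by
  cases a with
  | ofNat m =>
    show Int.ofNat (m <<< (k+1)) = 2 * Int.ofNat (m <<< k)
    rw [show Int.ofNat (m <<< (k+1)) = ((m <<< (k+1) : Nat) : Int) from rfl,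
       show Int.ofNat (m <<< k) = ((m <<< k : Nat) : Int) from rfl,
       Nat.shiftLeft_eq, Nat.shiftLeft_eq, pow_succ]
    push_cast; ring
  | negSucc m =>
    show Int.negSucc ((m+1) <<< (k+1) - 1) = 2 * Int.negSucc ((m+1) <<< k - 1)
    have h1 : (m+1) <<< (k+1) = 2 * ((m+1) <<< k) := by
      rw [Nat.shiftLeft_eq, Nat.shiftLeft_eq, pow_succ]; ring
    have h2 : 1 ≤ (m+1) <<< k := by
      rw [Nat.shiftLeft_eq]
      exact Nat.one_le_iff_ne_zero.mpr (by positivity)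
    have hA : 1 ≤ 2 * ((m+1) <<< k) := by omega
    rw [Int.negSucc_eq, Int.negSucc_eq, h1]
    push_cast [Nat.cast_sub hA, Nat.cast_sub h2]
    ring

theorem sl_tb (a : Int) (k i : Nat) : (a <<< k).testBit i = (decide (k ≤ i) && a.testBit (i - k)) := by
  induction k generalizing i with
  | zero => simp [sl_zero]
  | succ k ih =>
    rw [sl_succ]
    have hbit : (2 * (a <<< k)) = Int.bit false (a <<< k) := by
      simp [Int.bit]
    rw [hbit]
    cases i with
    | zero => simp [Int.testBit_bit_zero]
    | succ i =>
      rw [Int.testBit_bit_succ, ih]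
      have : (i - k) = (i + 1 - (k + 1)) := by omega
      rw [this]
      by_cases h : k ≤ i
      · simp [h, Nat.succ_le_succ h]
      · simp [h, fun hh => h (Nat.le_of_succ_le_succ hh)]

theorem tb_pow (p k : Nat) : ((2:Int)^p).testBit k = decide (p = k) := by
  rw [show ((2:Int)^p) = (((2^p : Nat)) : Int) by push_cast; ring, tb_natCast,
     Nat.testBit_two_pow]

theorem tb_one (k : Nat) : (1:Int).testBit k = decide (0 = k) := by
  have h := tb_pow 0 k
  simpa using h

theorem one_sl (k : Nat) : (1:Int) <<< k = 2^k := by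
  show Int.ofNat (1 <<< k) = 2^k
  rw [show Int.ofNat (1 <<< k) = ((1 <<< k : Nat) : Int) from rfl, Nat.shiftLeft_eq]
  push_cast; ring

theorem pow_sr (p : Nat) (hp : 1 ≤ p) : ((2:Int)^p) >>> (1:Nat) = 2^(p-1) := by
  apply int_ext
  intro i
  rw [sr_tb, tb_pow, tb_pow]
  by_cases h : p - 1 = i
  · simp [h, show p = i + 1 by omega]
  · simp [h, show ¬ p = i + 1 by omega]

theorem pow_sl (q : Nat) : ((2:Int)^q) <<< (1:Nat) = 2^(q+1) := by
  rw [show (1:Nat) = 0 + 1 from rfl, sl_succ, sl_zero, pow_succ]; ring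

-- the conditional xor-swap step exchanges bits p and q
theorem swap_tb (v : Int) (p q : Nat) (hne : p ≠ q) (j : Nat) :
    ((if PySem.Int.band v (PySem.Int.bor (2^p) (2^q)) ≠ 0 ∧
        PySem.Int.band v (PySem.Int.bor (2^p) (2^q)) ≠ PySem.Int.bor (2^p) (2^q)
      then PySem.Int.bxor v (PySem.Int.bor (2^p) (2^q)) else v)).testBit j
    = (if j = p then v.testBit q else if j = q then v.testBit p else v.testBit j) := by
  have hmask : ∀ k, (PySem.Int.bor ((2:Int)^p) (2^q)).testBit k = (decide (p = k) || decide (q = k)) := by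
    intro k
    rw [bor_eq, Int.testBit_lor, tb_pow, tb_pow]
  have hmasked : ∀ k, (PySem.Int.band v (PySem.Int.bor ((2:Int)^p) (2^q))).testBit k
      = (v.testBit k && (decide (p = k) || decide (q = k))) := by
    intro k
    rw [band_eq, Int.testBit_land, hmask]
  have h0 : PySem.Int.band v (PySem.Int.bor ((2:Int)^p) (2^q)) = 0 ↔
      (v.testBit p = false ∧ v.testBit q = false) := by
    constructor
    · intro h
      constructor
      · have := hmasked p; rw [h, tb_zero] at this; simpa using this.symm
      · have := hmasked q; rw [h, tb_zero] at this; simpa using this.symm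
    · intro hfq
      apply int_ext
      intro k
      rw [hmasked, tb_zero]
      by_cases hkp : p = k
      · rw [← hkp]; simp [hfq.1]
      · by_cases hkq : q = k
        · rw [← hkq]; simp [hfq.2]
        · simp [hkp, hkq]
  have hfull : PySem.Int.band v (PySem.Int.bor ((2:Int)^p) (2^q)) = PySem.Int.bor ((2:Int)^p) (2^q) ↔
      (v.testBit p = true ∧ v.testBit q = true) := by
    constructor
    · intro h
      constructor
      · have := hmasked p; rw [h, hmask] at this; simpa using this
      · have := hmasked q; rw [h, hmask] at this; simpa using this
    · intro hfq
      apply int_ext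
      intro k
      rw [hmasked, hmask]
      by_cases hkp : p = k
      · rw [← hkp]; simp [hfq.1]
      · by_cases hkq : q = k
        · rw [← hkq]; simp [hfq.2]
        · simp [hkp, hkq]
  cases hvp : v.testBit p <;> cases hvq : v.testBit q
  · -- both false: no swap
    rw [if_neg (by rw [not_and_or]; left; simp [h0, hvp, hvq])]
    split_ifs with h1 h2
    · simp [h1, hvp, hvq]
    · simp [h2, hvp, hvq]
    · rfl
  · -- differ: xor fires
    rw [if_pos ⟨by simp [h0, hvp, hvq], by simp [hfull, hvp, hvq]⟩, bxor_eq,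
       Int.testBit_lxor, hmask]
    split_ifs with h1 h2
    · simp [h1, hvp, hvq]
    · simp [h2, hvp, hvq, hne]
    · have hp' : ¬ p = j := by omega
      have hq' : ¬ q = j := by omega
      simp [hp', hq']
  · -- differ: xor fires
    rw [if_pos ⟨by simp [h0, hvp, hvq], by simp [hfull, hvp, hvq]⟩, bxor_eq,
       Int.testBit_lxor, hmask]
    split_ifs with h1 h2
    · simp [h1, hvp, hvq]
    · simp [h2, hvp, hvq, hne]
    · have hp' : ¬ p = j := by omega
      have hq' : ¬ q = j := by omega
      simp [hp', hq']
  · -- both true: no swap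
    rw [if_neg (by rw [not_and_or]; right; simp [hfull, hvp, hvq])]
    split_ifs with h1 h2
    · simp [h1, hvp, hvq]
    · simp [h2, hvp, hvq]
    · rfl

theorem loopA_tb (f : Nat) : ∀ (p q : Nat) (v : Int) (j : Nat), p ≤ q + 2*f →
    (mirrorLoopA f v ((2:Int)^p) ((2:Int)^q)).testBit j
      = v.testBit (if q ≤ j ∧ j ≤ p then p + q - j else j) := by
  induction f with
  | zero =>
    intro p q v j hf
    have hidx : (if q ≤ j ∧ j ≤ p then p + q - j else j) = j := by split_ifs <;> omega
    rw [hidx]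
    rfl
  | succ f ih =>
    intro p q v j hf
    by_cases hpq : q < p
    · have hguard : ((2:Int)^p > 2^q) :=
        (pow_lt_pow_iff_right₀ (by norm_num : (1:Int) < 2)).mpr hpq
      rw [show mirrorLoopA (f+1) v ((2:Int)^p) ((2:Int)^q)
          = mirrorLoopA f
              (if PySem.Int.band v (PySem.Int.bor (2^p) (2^q)) ≠ 0 ∧
                  PySem.Int.band v (PySem.Int.bor (2^p) (2^q)) ≠ PySem.Int.bor (2^p) (2^q)
               then PySem.Int.bxor v (PySem.Int.bor (2^p) (2^q)) else v)
              (((2:Int)^p) >>> (1:Nat)) (((2:Int)^q) <<< (1:Nat)) by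
        simp only [mirrorLoopA, if_pos hguard]]
      rw [pow_sr p (by omega), pow_sl, ih (p-1) (q+1) _ j (by omega),
         swap_tb v p q (by omega)]
      by_cases hin : q + 1 ≤ j ∧ j ≤ p - 1
      · rw [if_pos hin, if_neg (show ¬ (p - 1 + (q+1) - j = p) by omega),
           if_neg (show ¬ (p - 1 + (q+1) - j = q) by omega),
           if_pos (show q ≤ j ∧ j ≤ p by omega)]
        congr 1
        omega
      · rw [if_neg hin]
        by_cases hjp : j = p
        · rw [if_pos hjp, if_pos (show q ≤ j ∧ j ≤ p by omega)]
          congr 1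
          omega
        · by_cases hjq : j = q
          · rw [if_neg hjp, if_pos hjq, if_pos (show q ≤ j ∧ j ≤ p by omega)]
            congr 1
            omega
          · rw [if_neg hjp, if_neg hjq, if_neg (show ¬ (q ≤ j ∧ j ≤ p) by omega)]
    · have hguard : ¬ ((2:Int)^p > 2^q) := by
        rw [not_lt]
        exact pow_le_pow_right₀ (by norm_num) (by omega)
      have hidx : (if q ≤ j ∧ j ≤ p then p + q - j else j) = j := by split_ifs <;> omega
      rw [hidx]
      simp only [mirrorLoopA, if_neg hguard]

theorem low_tb (v : Int) : ∀ (n : Nat) (j : Nat),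
    (((List.range n).map (fun k : Nat => (0:Int) + (k : Int))).foldl
        (fun low i => PySem.Int.bor (low <<< (1:Nat)) (PySem.Int.band (v >>> i.toNat) 1)) 0).testBit j
      = (if j < n then v.testBit (n - 1 - j) else false) := by
  intro n
  induction n with
  | zero => intro j; simp [tb_zero]
  | succ n ih =>
    intro j
    rw [List.range_succ, List.map_append, List.foldl_append]
    simp only [List.map_cons, List.map_nil, List.foldl_cons, List.foldl_nil]
    rw [show (((0:Int) + ((n:Nat) : Int))).toNat = n by omega,
       bor_eq, Int.testBit_lor, sl_tb, band_eq, Int.testBit_land,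
       Int.shiftRight_natCast_right, sr_tb, tb_one, ih]
    cases j with
    | zero => simp
    | succ j =>
      have h1 : (decide ((1:Nat) ≤ j + 1)) = true := by simp
      have h2 : (decide ((0:Nat) = j + 1)) = false := by simp
      rw [h1, h2]
      simp only [Bool.true_and, Bool.and_false, Bool.or_false, Nat.add_sub_cancel]
      by_cases hj : j < n
      · rw [if_pos hj, if_pos (by omega)]
        congr 1
        omega
      · rw [if_neg hj, if_neg (by omega)]

-- ===== VERDICT (by name: the statement is the Claim_ definition above) =====
theorem mirror_bits_py_spec : Claim_equal_mirror_bits_py := by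
  intro value bits _ hpre
  have hb : 1 ≤ bits := hpre
  unfold Spec_mirror_bits_py mirror_bits_py mirror_bits_py_alt
  have hb1 : (bits - 1).toNat = bits.toNat - 1 := by omega
  have hbn : 1 ≤ bits.toNat := by omega
  rw [hb1, one_sl, PySem.List.pyRange_one,
     show ((bits - 0).toNat) = bits.toNat by omega]
  apply int_ext
  intro j
  conv_lhs => rw [show (1:Int) = (2:Int)^(0:Nat) by norm_num]
  rw [loopA_tb bits.toNat (bits.toNat - 1) 0 value j (by omega),
     bor_eq, Int.testBit_lor, sl_tb, sr_tb, low_tb value bits.toNat j]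
  by_cases hj : j < bits.toNat
  · rw [if_pos (show 0 ≤ j ∧ j ≤ bits.toNat - 1 by omega), if_pos hj,
       show (decide (bits.toNat ≤ j)) = false by simp only [decide_eq_false_iff_not]; omega]
    simp only [Bool.false_and, Bool.false_or]
    have h3 : bits.toNat - 1 + 0 - j = bits.toNat - 1 - j := by omega
    rw [h3]
  · rw [if_neg (show ¬ (0 ≤ j ∧ j ≤ bits.toNat - 1) by omega), if_neg hj,
       show (decide (bits.toNat ≤ j)) = true by simp only [decide_eq_true_eq]; omega]
    simp only [Bool.true_and, Bool.or_false]
    have h3 : j - bits.toNat + bits.toNat = j := by omega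
    rw [h3]
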